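-- pv_equiv track=rewrite | github.com/Kai-theSun/MyLeetCodeRecord | strings.py | backtrack
-- ===== SOURCE A (Python) =====
-- def backtrack(s, start, seen):
--     if start == len(s):
--         return 0
--     max_count = 0
--
--     for end in range(start + 1, len(s) + 1):
--         sub_string = s[start:end]
--         if sub_string not in seen:
--             seen.add(sub_string)
--             max_count = max(max_count, 1 + backtrack(s, end, seen))
--             seen.remove(sub_string)
--     return max_count
-- ===== SOURCE B (Python) =====
-- def backtrack(s, start, seen):
--     n = len(s)
--     best = 0
--     stack = [(start, 0, set(seen))]
--     while stack:
--         pos, count, cur = stack.pop()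
--         if count > best:
--             best = count
--         for end in range(pos + 1, n + 1):
--             sub = s[pos:end]
--             if sub not in cur:
--                 stack.append((end, count + 1, cur | {sub}))
--     return best
-- ===== Notes on version B (the rewrite author's own statement) =====
-- stated objective: alternative
-- what changed: Replaced A's return-value recursion with seen-set mutation by an iterative worklist DFS: an explicit stack of (pos, count, set) frames popped in a while loop, each frame carrying its own immutable set, with a running best accumulator; no recursion and no mutation of the caller's seen.
import Mathlib
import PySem

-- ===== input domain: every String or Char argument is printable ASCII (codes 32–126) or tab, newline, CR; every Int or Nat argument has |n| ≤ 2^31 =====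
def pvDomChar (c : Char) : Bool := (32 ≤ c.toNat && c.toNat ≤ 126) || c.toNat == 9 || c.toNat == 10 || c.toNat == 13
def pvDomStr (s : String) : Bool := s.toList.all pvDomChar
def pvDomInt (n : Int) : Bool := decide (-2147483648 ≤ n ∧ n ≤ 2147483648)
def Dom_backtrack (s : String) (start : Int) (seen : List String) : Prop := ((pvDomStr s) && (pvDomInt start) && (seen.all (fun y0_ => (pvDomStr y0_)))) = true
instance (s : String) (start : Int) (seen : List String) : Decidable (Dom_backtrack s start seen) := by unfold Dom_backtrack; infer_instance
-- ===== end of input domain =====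

-- B replaces A's return-value recursion (which temporarily mutates the caller's
-- seen set with a net-zero add/remove pair) by an iterative worklist DFS: an
-- explicit stack of (pos, count, set) frames popped in a while loop, each frame
-- carrying its own immutable set, and a running best; alternative decomposition,
-- same cost.  Equivalence is about the return value; A's mutation of seen has no
-- net effect and B performs none.  Each port carries a structural Nat fuel as a
-- totalizing guard only: A's is one above its recursion depth, B's is the node
-- count 2^(len(s)+1-start) of the partition tree, and neither ever runs out.

-- ===== PORT A =====
def backtrackGo : Nat → String → Int → List String → Int
  | 0, _, _, _ => 0
  | fuel + 1, s, start, seen =>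
    if start = PySem.Str.len s then 0
    else
      (PySem.List.pyRange (start + 1) (PySem.Str.len s + 1) 1).foldl
        (fun acc e =>
          let sub := PySem.Str.slice s (some start) (some e)
          if sub ∈ seen then acc
          else max acc (1 + backtrackGo fuel s e (PySem.Set.add seen sub)))
        0

def backtrack (s : String) (start : Int) (seen : List String) : Int :=
  backtrackGo ((PySem.Str.len s + 1 - start).toNat + 1) s start seen

-- ===== PORT B =====
-- Source B's while loop over the explicit stack; the Lean list's head is the top of
-- the Python stack (its last element), so append is cons and pop() is the head.
def runB : Nat → String → List (Int × Int × List String) → Int → Int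
  | 0, _, _, best => best
  | _ + 1, _, [], best => best
  | fuel + 1, s, (pos, count, cur) :: rest, best =>
    runB fuel s
      ((PySem.List.pyRange (pos + 1) (PySem.Str.len s + 1) 1).foldl
        (fun st e =>
          let sub := PySem.Str.slice s (some pos) (some e)
          if sub ∈ cur then st else (e, count + 1, PySem.Set.add cur sub) :: st)
        rest)
      (if best < count then count else best)

def backtrack_alt (s : String) (start : Int) (seen : List String) : Int :=
  runB (2 ^ (PySem.Str.len s + 1 - start).toNat) s [(start, 0, seen)] 0

-- ===== PRECONDITION & SPEC =====
def Spec_backtrack (s : String) (start : Int) (seen : List String) (out : Int) : Prop := out = backtrack_alt s start seen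
instance (s : String) (start : Int) (seen : List String) (out : Int) : Decidable (Spec_backtrack s start seen out) := by unfold Spec_backtrack; infer_instance

-- ===== CLAIM (what is proved, stated in full; the proofs are below) =====
def Claim_equal_backtrack : Prop := ∀ (s : String) (start : Int) (seen : List String), Dom_backtrack s start seen → Spec_backtrack s start seen (backtrack s start seen)

-- ===== LEMMAS AND PROOFS =====

-- A's value at a position, with its canonical (always sufficient) fuel.
def aval (s : String) (pos : Int) (cur : List String) : Int :=
  backtrackGo ((PySem.Str.len s + 1 - pos).toNat + 1) s pos cur

-- potential of a frame / of a stack (bounds the number of pops B still does)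
def phi (s : String) (pos : Int) : Nat := 2 ^ (PySem.Str.len s + 1 - pos).toNat

def cost (s : String) (stack : List (Int × Int × List String)) : Nat :=
  (stack.map (fun fr => phi s fr.1)).sum

-- A's loop body with an arbitrary fuel
def stepA (fuel : Nat) (s : String) (pos : Int) (cur : List String) : Int → Int → Int :=
  fun acc e =>
    let sub := PySem.Str.slice s (some pos) (some e)
    if sub ∈ cur then acc
    else max acc (1 + backtrackGo fuel s e (PySem.Set.add cur sub))

-- A's loop body phrased with canonical inner fuels
def stepA' (s : String) (pos : Int) (cur : List String) : Int → Int → Int :=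
  fun acc e =>
    let sub := PySem.Str.slice s (some pos) (some e)
    if sub ∈ cur then acc
    else max acc (1 + aval s e (PySem.Set.add cur sub))

-- B's push body
def pushB (s : String) (pos count : Int) (cur : List String) :
    List (Int × Int × List String) → Int → List (Int × Int × List String) :=
  fun st e =>
    let sub := PySem.Str.slice s (some pos) (some e)
    if sub ∈ cur then st else (e, count + 1, PySem.Set.add cur sub) :: st

-- the "value" of a frame, and folding it into the running best
def fval (s : String) (fr : Int × Int × List String) : Int := fr.2.1 + aval s fr.1 fr.2.2

def gfold (s : String) : Int → (Int × Int × List String) → Int :=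
  fun b fr => max b (fval s fr)

theorem backtrackGo_succ (fuel : Nat) (s : String) (start : Int) (seen : List String) :
    backtrackGo (fuel + 1) s start seen =
      if start = PySem.Str.len s then 0
      else (PySem.List.pyRange (start + 1) (PySem.Str.len s + 1) 1).foldl (stepA fuel s start seen) 0 := rfl

theorem runB_succ (fuel : Nat) (s : String) (pos count : Int) (cur : List String)
    (rest : List (Int × Int × List String)) (best : Int) :
    runB (fuel + 1) s ((pos, count, cur) :: rest) best =
      runB fuel s
        ((PySem.List.pyRange (pos + 1) (PySem.Str.len s + 1) 1).foldl (pushB s pos count cur) rest)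
        (if best < count then count else best) := rfl

theorem stepA_le (fuel : Nat) (s : String) (pos : Int) (cur : List String) (acc e : Int) :
    acc ≤ stepA fuel s pos cur acc e := by
  simp only [stepA]
  split <;> omega

theorem foldA_ge : ∀ (l : List Int) (fuel : Nat) (s : String) (pos : Int) (cur : List String) (acc : Int),
    acc ≤ l.foldl (stepA fuel s pos cur) acc := by
  intro l
  induction l with
  | nil => intro fuel s pos cur acc; simp
  | cons e l ih =>
    intro fuel s pos cur acc
    simp only [List.foldl_cons]
    exact le_trans (stepA_le fuel s pos cur acc e) (ih fuel s pos cur _)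

theorem backtrackGo_nonneg (fuel : Nat) (s : String) (pos : Int) (cur : List String) :
    0 ≤ backtrackGo fuel s pos cur := by
  cases fuel with
  | zero => simp [backtrackGo]
  | succ fuel =>
    rw [backtrackGo_succ]
    split
    · omega
    · exact foldA_ge _ fuel s pos cur 0

theorem aval_nonneg (s : String) (pos : Int) (cur : List String) : 0 ≤ aval s pos cur :=
  backtrackGo_nonneg _ s pos cur

-- fuel-stability of A's recursion above its depth bound
theorem backtrackGo_stable : ∀ (k fa fb : Nat) (s : String) (pos : Int) (cur : List String),
    (PySem.Str.len s + 1 - pos).toNat ≤ k → k < fa → k < fb →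
    backtrackGo fa s pos cur = backtrackGo fb s pos cur := by
  intro k
  induction k using Nat.strong_induction_on with
  | _ k IH =>
  intro fa fb s pos cur hk hfa hfb
  obtain ⟨fa', rfl⟩ : ∃ fa', fa = fa' + 1 := ⟨fa - 1, by omega⟩
  obtain ⟨fb', rfl⟩ : ∃ fb', fb = fb' + 1 := ⟨fb - 1, by omega⟩
  rw [backtrackGo_succ, backtrackGo_succ]
  split
  · rfl
  · apply PySem.List.foldl_congr_mem
    intro acc e he
    rw [PySem.List.mem_pyRange_one] at he
    simp only [stepA]
    by_cases hmem : PySem.Str.slice s (some pos) (some e) ∈ cur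
    · simp [hmem]
    · simp only [if_neg hmem]
      rw [IH (PySem.Str.len s + 1 - e).toNat (by omega) fa' fb' s e _ le_rfl (by omega) (by omega)]

theorem aval_unfold (s : String) (pos : Int) (cur : List String) :
    aval s pos cur =
      if pos = PySem.Str.len s then 0
      else (PySem.List.pyRange (pos + 1) (PySem.Str.len s + 1) 1).foldl (stepA' s pos cur) 0 := by
  unfold aval
  rw [backtrackGo_succ]
  split
  · rfl
  · apply PySem.List.foldl_congr_mem
    intro acc e he
    rw [PySem.List.mem_pyRange_one] at he
    simp only [stepA, stepA']
    by_cases hmem : PySem.Str.slice s (some pos) (some e) ∈ cur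
    · simp [hmem]
    · simp only [if_neg hmem]
      unfold aval
      rw [backtrackGo_stable (PySem.Str.len s + 1 - e).toNat ((PySem.Str.len s + 1 - pos).toNat)
        ((PySem.Str.len s + 1 - e).toNat + 1) s e _ le_rfl (by omega) (by omega)]

-- pull a max through A's canonical loop (accumulator must be nonnegative)
theorem foldA'_ge : ∀ (l : List Int) (s : String) (pos : Int) (cur : List String) (acc : Int),
    acc ≤ l.foldl (stepA' s pos cur) acc := by
  intro l
  induction l with
  | nil => intro s pos cur acc; simp
  | cons e l ih =>
    intro s pos cur acc
    simp only [List.foldl_cons]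
    refine le_trans ?_ (ih s pos cur _)
    simp only [stepA']
    split <;> omega

theorem foldA'_max : ∀ (l : List Int) (s : String) (pos : Int) (cur : List String) (acc : Int),
    0 ≤ acc →
    l.foldl (stepA' s pos cur) acc = max acc (l.foldl (stepA' s pos cur) 0) := by
  intro l
  induction l with
  | nil => intro s pos cur acc hacc; simp; omega
  | cons e l ih =>
    intro s pos cur acc hacc
    simp only [List.foldl_cons]
    have hstep : stepA' s pos cur acc e = max acc (stepA' s pos cur 0 e) := by
      simp only [stepA']
      split <;> omega
    have h0 : (0 : Int) ≤ stepA' s pos cur 0 e := by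
      simp only [stepA']; split
      · omega
      · have := aval_nonneg s e (PySem.Set.add cur (PySem.Str.slice s (some pos) (some e))); omega
    have hge := foldA'_ge l s pos cur (stepA' s pos cur 0 e)
    rw [ih s pos cur (stepA' s pos cur acc e) (by omega),
        ih s pos cur (stepA' s pos cur 0 e) (by omega)]
    omega

-- B's inner-loop fold of values (one child per unblocked end)
def hfold (s : String) (pos count : Int) (cur : List String) : Int → Int → Int :=
  fun b e =>
    let sub := PySem.Str.slice s (some pos) (some e)
    if sub ∈ cur then b
    else max b (count + 1 + aval s e (PySem.Set.add cur sub))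

theorem hfold_pull : ∀ (l : List Int) (s : String) (pos count : Int) (cur : List String) (b c : Int),
    l.foldl (hfold s pos count cur) (max b c) = max (l.foldl (hfold s pos count cur) b) c := by
  intro l
  induction l with
  | nil => intro s pos count cur b c; simp
  | cons e l ih =>
    intro s pos count cur b c
    simp only [List.foldl_cons, hfold]
    split
    · exact ih s pos count cur b c
    · rw [max_right_comm b c _]
      exact ih s pos count cur _ c

-- folding the frames pushed by B's inner loop = folding their values directly
theorem push_fold : ∀ (l : List Int) (s : String) (pos count : Int) (cur : List String)
    (st : List (Int × Int × List String)) (b : Int),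
    (l.foldl (pushB s pos count cur) st).foldl (gfold s) b =
      st.foldl (gfold s) (l.foldl (hfold s pos count cur) b) := by
  intro l
  induction l with
  | nil => intro s pos count cur st b; simp
  | cons e l ih =>
    intro s pos count cur st b
    simp only [List.foldl_cons, pushB, hfold]
    by_cases hmem : PySem.Str.slice s (some pos) (some e) ∈ cur
    · simp only [if_pos hmem]
      exact ih s pos count cur st b
    · simp only [if_neg hmem]
      rw [ih s pos count cur _ b]
      simp only [List.foldl_cons, gfold, fval]
      rw [← hfold_pull l s pos count cur b _]

-- the per-node correspondence: B's inner loop folded into best equals A's value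
theorem loop_val : ∀ (l : List Int) (s : String) (pos count : Int) (cur : List String) (b : Int),
    l.foldl (hfold s pos count cur) (max b count) =
      max b (count + l.foldl (stepA' s pos cur) 0) := by
  intro l
  induction l with
  | nil => intro s pos count cur b; simp
  | cons e l ih =>
    intro s pos count cur b
    simp only [List.foldl_cons, hfold, stepA']
    by_cases hmem : PySem.Str.slice s (some pos) (some e) ∈ cur
    · simp only [if_pos hmem]
      exact ih s pos count cur b
    · simp only [if_neg hmem]
      have hA0 : (0 : Int) ≤ aval s e (PySem.Set.add cur (PySem.Str.slice s (some pos) (some e))) :=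
        aval_nonneg s e _
      have hb' : max (max b count) (count + 1 + aval s e (PySem.Set.add cur (PySem.Str.slice s (some pos) (some e))))
          = max (max b (count + 1 + aval s e (PySem.Set.add cur (PySem.Str.slice s (some pos) (some e))))) count := by
        omega
      rw [hb', ih s pos count cur _]
      rw [foldA'_max l s pos cur (max 0 (1 + aval s e (PySem.Set.add cur (PySem.Str.slice s (some pos) (some e))))) (by omega)]
      have := foldA'_ge l s pos cur 0
      omega

-- potential bookkeeping ----------------------------------------------------

theorem phi_pos (s : String) (pos : Int) : 1 ≤ phi s pos := Nat.one_le_two_pow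

theorem cost_cons (s : String) (fr : Int × Int × List String) (st : List (Int × Int × List String)) :
    cost s (fr :: st) = phi s fr.1 + cost s st := by
  simp [cost]

-- the total potential of all children of a node is below the node's own
theorem sum_phi_le : ∀ (k : Nat) (s : String) (pos : Int),
    (PySem.Str.len s + 1 - pos).toNat ≤ k →
    ((PySem.List.pyRange (pos + 1) (PySem.Str.len s + 1) 1).map (phi s)).sum + 1 ≤ phi s pos := by
  intro k
  induction k with
  | zero =>
    intro s pos hk
    rw [PySem.List.pyRange_one_eq_nil (by omega)]
    simpa using phi_pos s pos
  | succ k ih =>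
    intro s pos hk
    by_cases h : pos + 1 < PySem.Str.len s + 1
    · rw [PySem.List.pyRange_one_cons h]
      simp only [List.map_cons, List.sum_cons]
      have h2 := ih s (pos + 1) (by omega)
      have hphi : phi s pos = 2 * phi s (pos + 1) := by
        unfold phi
        rw [← pow_succ']
        congr 1
        omega
      omega
    · rw [PySem.List.pyRange_one_eq_nil (by omega)]
      simpa using phi_pos s pos

-- pushing children onto a stack raises its cost by at most their total potential
theorem cost_push_le : ∀ (l : List Int) (s : String) (pos count : Int) (cur : List String)
    (st : List (Int × Int × List String)),
    cost s (l.foldl (pushB s pos count cur) st) ≤ cost s st + (l.map (phi s)).sum := by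
  intro l
  induction l with
  | nil => intro s pos count cur st; simp
  | cons e l ih =>
    intro s pos count cur st
    simp only [List.foldl_cons, pushB, List.map_cons, List.sum_cons]
    by_cases hmem : PySem.Str.slice s (some pos) (some e) ∈ cur
    · simp only [if_pos hmem]
      have := ih s pos count cur st
      omega
    · simp only [if_neg hmem]
      have := ih s pos count cur ((e, count + 1, PySem.Set.add cur (PySem.Str.slice s (some pos) (some e))) :: st)
      rw [cost_cons] at this
      have hfr : phi s ((e, count + 1, PySem.Set.add cur (PySem.Str.slice s (some pos) (some e))) :
          Int × Int × List String).1 = phi s e := rfl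
      omega

theorem cost_nil_of_zero (s : String) (st : List (Int × Int × List String)) (h : cost s st = 0) :
    st = [] := by
  cases st with
  | nil => rfl
  | cons fr st =>
    rw [cost_cons] at h
    have := phi_pos s fr.1
    omega

-- the machine lemma: with enough fuel, B's while loop folds the values of the
-- frames on the stack into the running best
theorem runB_eq : ∀ (fuel : Nat) (s : String) (stack : List (Int × Int × List String)) (best : Int),
    cost s stack ≤ fuel →
    runB fuel s stack best = stack.foldl (gfold s) best := by
  intro fuel
  induction fuel with
  | zero =>
    intro s stack best h
    rw [cost_nil_of_zero s stack (by omega)]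
    rfl
  | succ fuel ih =>
    intro s stack best h
    cases stack with
    | nil => rfl
    | cons fr rest =>
      obtain ⟨pos, count, cur⟩ := fr
      rw [runB_succ]
      rw [cost_cons] at h
      have hfr : phi s ((pos, count, cur) : Int × Int × List String).1 = phi s pos := rfl
      have hsum := sum_phi_le (PySem.Str.len s + 1 - pos).toNat s pos le_rfl
      have hcost := cost_push_le (PySem.List.pyRange (pos + 1) (PySem.Str.len s + 1) 1) s pos count cur rest
      rw [ih s _ _ (by omega)]
      rw [push_fold]
      simp only [List.foldl_cons, gfold, fval]
      congr 1
      have hbc : (if best < count then count else best) = max best count := by omega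
      rw [hbc, loop_val, aval_unfold]
      split
      · rename_i hEq
        rw [hEq]
        rw [PySem.List.pyRange_one_eq_nil (by omega)]
        simp
      · rfl

-- ===== VERDICT (by name: the statement is the Claim_ definition above) =====
theorem backtrack_spec : Claim_equal_backtrack := by
  intro s start seen _
  unfold Spec_backtrack backtrack_alt backtrack
  rw [runB_eq (2 ^ (PySem.Str.len s + 1 - start).toNat) s [(start, 0, seen)] 0
    (by rw [cost_cons]; simp [cost, phi])]
  simp only [List.foldl_cons, List.foldl_nil, gfold, fval]
  have h0 := aval_nonneg s start seen
  unfold aval at h0 ⊢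
  omega
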